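-- pv_equiv track=rewrite | github.com/jam0824/jibun_ikusei | lily_desktop/core/action_log_summary_backfill_service.py | _collect_themes
-- ===== SOURCE A (Python) =====
-- from typing import Any
--
-- def _collect_themes(sessions: list[dict[str, Any]], limit: int) -> list[str]:
--     themes: list[str] = []
--     for session in sessions:
--         themes.extend(session.get("activityKinds", []))
--         themes.extend(session.get("domains", []))
--
--     seen: set[str] = set()
--     ordered: list[str] = []
--     for theme in themes:
--         if not theme or theme in seen:
--             continue
--         seen.add(theme)
--         ordered.append(theme)
--         if len(ordered) >= limit:
--             break
--     return ordered
-- ===== SOURCE B (Python) =====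
-- def _collect_themes(sessions: list, limit: int) -> list:
--     seen: set[str] = set()
--     ordered: list[str] = []
--     for session in sessions:
--         for key in ("activityKinds", "domains"):
--             for theme in session.get(key, []):
--                 if theme and theme not in seen:
--                     seen.add(theme)
--                     ordered.append(theme)
--                     if len(ordered) >= limit:
--                         return ordered
--     return ordered
-- ===== Notes on version B (the rewrite author's own statement) =====
-- stated objective: alternative
-- what changed: B fuses A's two passes into one: instead of first concatenating every session's activityKinds and domains into an intermediate themes list and then deduplicating it with a break, B streams the candidates session by session with a seen-set and an early return, never building the intermediate list; it trades the second loop for nested loops with an early exit.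
import Mathlib
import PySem

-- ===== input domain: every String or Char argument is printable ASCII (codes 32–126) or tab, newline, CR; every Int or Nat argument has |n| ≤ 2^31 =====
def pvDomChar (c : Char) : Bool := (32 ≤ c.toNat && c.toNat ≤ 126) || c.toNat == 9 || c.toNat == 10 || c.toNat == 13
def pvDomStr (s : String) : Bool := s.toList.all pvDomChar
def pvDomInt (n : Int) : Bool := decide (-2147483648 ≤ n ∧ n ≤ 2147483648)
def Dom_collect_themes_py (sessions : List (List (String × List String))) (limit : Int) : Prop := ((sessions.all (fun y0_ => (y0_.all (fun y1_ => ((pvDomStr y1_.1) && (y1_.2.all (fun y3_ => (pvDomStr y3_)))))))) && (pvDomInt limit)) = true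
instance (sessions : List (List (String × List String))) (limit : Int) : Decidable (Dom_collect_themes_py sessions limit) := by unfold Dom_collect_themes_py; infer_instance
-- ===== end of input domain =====

-- B fuses A's two passes (build the full themes list, then dedup with a break) into one streaming
-- pass with an early return; same return value, never materialises the intermediate list.

-- ===== PORT A =====
-- second loop of A: dedup themes in order, break once len(ordered) >= limit (checked after append)
def pvLoopA (limit : Int) : List String → PySem.Set String → List String → List String
  | [], _, ordered => ordered
  | t :: ts, seen, ordered =>
    if t = "" ∨ PySem.Set.contains seen t then pvLoopA limit ts seen ordered
    else
      let seen' := PySem.Set.add seen t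
      let ordered' := ordered ++ [t]
      if limit ≤ (ordered'.length : Int) then ordered'
      else pvLoopA limit ts seen' ordered'

def collect_themes_py (sessions : List (List (String × List String))) (limit : Int) : List String :=
  let themes := sessions.foldl (fun acc session =>
    acc ++ (PySem.Dict.mk session).getD "activityKinds" []
        ++ (PySem.Dict.mk session).getD "domains" []) []
  pvLoopA limit themes PySem.Set.empty []

-- ===== PORT B =====
-- inner loop of B over one candidate list; Bool = "limit reached, return ordered now"
def pvScanB (limit : Int) : List String → PySem.Set String → List String → PySem.Set String × List String × Bool
  | [], seen, ordered => (seen, ordered, false)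
  | t :: ts, seen, ordered =>
    if t ≠ "" ∧ ¬ (PySem.Set.contains seen t = true) then
      let seen' := PySem.Set.add seen t
      let ordered' := ordered ++ [t]
      if limit ≤ (ordered'.length : Int) then (seen', ordered', true)
      else pvScanB limit ts seen' ordered'
    else pvScanB limit ts seen ordered

-- outer loop of B over sessions: activityKinds then domains, early return on the flag
def pvOuterB (limit : Int) : List (List (String × List String)) → PySem.Set String → List String → List String
  | [], _, ordered => ordered
  | session :: rest, seen, ordered =>
    match pvScanB limit ((PySem.Dict.mk session).getD "activityKinds" []) seen ordered with
    | (_, o1, true) => o1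
    | (s1, o1, false) =>
      match pvScanB limit ((PySem.Dict.mk session).getD "domains" []) s1 o1 with
      | (_, o2, true) => o2
      | (s2, o2, false) => pvOuterB limit rest s2 o2

def collect_themes_py_alt (sessions : List (List (String × List String))) (limit : Int) : List String :=
  pvOuterB limit sessions PySem.Set.empty []

-- ===== PRECONDITION & SPEC =====
def Spec_collect_themes_py (sessions : List (List (String × List String))) (limit : Int) (out : List String) : Prop := out = collect_themes_py_alt sessions limit
instance (sessions : List (List (String × List String))) (limit : Int) (out : List String) : Decidable (Spec_collect_themes_py sessions limit out) := by unfold Spec_collect_themes_py; infer_instance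

-- ===== CLAIM (what is proved, stated in full; the proofs are below) =====
def Claim_equal_collect_themes_py : Prop := ∀ (sessions : List (List (String × List String))) (limit : Int), Dom_collect_themes_py sessions limit → Spec_collect_themes_py sessions limit (collect_themes_py sessions limit)

-- ===== LEMMAS AND PROOFS =====

-- A's dedup loop on a concatenation = B's inner scan on the first part, then continue (or stop)
theorem pvLoopA_append (limit : Int) (xs : List String) :
    ∀ (rest : List String) (seen : PySem.Set String) (ordered : List String),
      pvLoopA limit (xs ++ rest) seen ordered =
        (match pvScanB limit xs seen ordered with
         | (_, o, true) => o
         | (s, o, false) => pvLoopA limit rest s o) := by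
  induction xs with
  | nil => intro rest seen ordered; simp [pvScanB]
  | cons t ts ih =>
    intro rest seen ordered
    by_cases h : t = "" ∨ PySem.Set.contains seen t = true
    · have h' : ¬ (t ≠ "" ∧ ¬ (PySem.Set.contains seen t = true)) := by tauto
      simp only [List.cons_append, pvLoopA, pvScanB, if_pos h, if_neg h']
      exact ih rest seen ordered
    · have h' : t ≠ "" ∧ ¬ (PySem.Set.contains seen t = true) := by tauto
      simp only [List.cons_append, pvLoopA, pvScanB, if_neg h, if_pos h']
      by_cases hl : limit ≤ ((ordered ++ [t]).length : Int)
      · simp only [if_pos hl]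
      · simp only [if_neg hl]
        exact ih rest _ _

-- B's outer loop computes A's dedup loop on the flattened themes list
theorem pvOuterB_eq (limit : Int) (sessions : List (List (String × List String))) :
    ∀ (seen : PySem.Set String) (ordered : List String),
      pvOuterB limit sessions seen ordered =
        pvLoopA limit
          (sessions.flatMap (fun session =>
            (PySem.Dict.mk session).getD "activityKinds" []
              ++ (PySem.Dict.mk session).getD "domains" [])) seen ordered := by
  induction sessions with
  | nil => intro seen ordered; simp [pvOuterB, pvLoopA]
  | cons session rest ih =>
    intro seen ordered
    rw [List.flatMap_cons, List.append_assoc, pvLoopA_append, pvOuterB]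
    rcases hs1 : pvScanB limit ((PySem.Dict.mk session).getD "activityKinds" []) seen ordered with ⟨s1, o1, d1⟩
    cases d1 with
    | true => rfl
    | false =>
      dsimp only
      rw [pvLoopA_append]
      rcases hs2 : pvScanB limit ((PySem.Dict.mk session).getD "domains" []) s1 o1 with ⟨s2, o2, d2⟩
      cases d2 with
      | true => rfl
      | false => exact ih s2 o2

-- ===== VERDICT (by name: the statement is the Claim_ definition above) =====
theorem collect_themes_py_spec : Claim_equal_collect_themes_py := by
  intro sessions limit _
  unfold Spec_collect_themes_py collect_themes_py collect_themes_py_alt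
  have hfold :
      sessions.foldl (fun acc session =>
        acc ++ (PySem.Dict.mk session).getD "activityKinds" []
            ++ (PySem.Dict.mk session).getD "domains" []) [] =
      sessions.flatMap (fun session =>
        (PySem.Dict.mk session).getD "activityKinds" []
          ++ (PySem.Dict.mk session).getD "domains" []) := by
    have := PySem.List.foldl_append_eq_flatMap
      (g := fun session : List (String × List String) =>
        (PySem.Dict.mk session).getD "activityKinds" []
          ++ (PySem.Dict.mk session).getD "domains" []) (l := sessions) (acc := [])
    simpa [List.append_assoc] using this
  rw [hfold, pvOuterB_eq]
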